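-- pv_equiv track=rewrite | github.com/wikimedia/cloud-toolforge-toolforge-cli | toolforge_cli/k8sclient.py | _get_context_to_use
-- ===== SOURCE A (Python) =====
-- from typing import Any, Dict, List, Optional, cast
--
-- class BadConfig(Exception):
--     pass
--
-- def _get_context_to_use(contexts: List[Dict[str, Any]], current_context_name: str) -> Dict[str, Any]:
--     """Prefer the toolforge context over anything else, fallback to the configured current context."""
--     current_context = None
--     for context in contexts:
--         if context["name"] == "toolforge":
--             return context["context"]
--         elif context["name"] == current_context_name:
--             current_context = context
--
--     if current_context is None:
--         raise BadConfig(
--             f"Unable to find a 'toolforge' context or current context '{current_context}' context in the kubectl config."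
--         )
--
--     return current_context["context"]
-- ===== SOURCE B (Python) =====
-- from typing import Any, Dict, List
--
-- class BadConfig(Exception):
--     pass
--
-- def _get_context_to_use(contexts: List[Dict[str, Any]], current_context_name: str) -> Dict[str, Any]:
--     """Return the 'toolforge' context if one exists, else the configured current context."""
--     toolforge = next((context for context in contexts if context["name"] == "toolforge"), None)
--     if toolforge is not None:
--         return toolforge["context"]
--
--     for context in reversed(contexts):
--         if context["name"] == current_context_name:
--             return context["context"]
--
--     raise BadConfig(
--         f"Unable to find a 'toolforge' context or the current context '{current_context_name}' in the kubectl config."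
--     )
-- ===== Notes on version B (the rewrite author's own statement) =====
-- stated objective: simpler
-- what changed: Replaces A's single fused loop with a last-match accumulator by two independent searches: next() for the first 'toolforge' context, then a reversed scan returning the first (i.e. last) current-context match; Pre_ excludes exactly the inputs where A raises (KeyError on a missing key it reaches, or BadConfig when nothing matches).
import Mathlib
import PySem

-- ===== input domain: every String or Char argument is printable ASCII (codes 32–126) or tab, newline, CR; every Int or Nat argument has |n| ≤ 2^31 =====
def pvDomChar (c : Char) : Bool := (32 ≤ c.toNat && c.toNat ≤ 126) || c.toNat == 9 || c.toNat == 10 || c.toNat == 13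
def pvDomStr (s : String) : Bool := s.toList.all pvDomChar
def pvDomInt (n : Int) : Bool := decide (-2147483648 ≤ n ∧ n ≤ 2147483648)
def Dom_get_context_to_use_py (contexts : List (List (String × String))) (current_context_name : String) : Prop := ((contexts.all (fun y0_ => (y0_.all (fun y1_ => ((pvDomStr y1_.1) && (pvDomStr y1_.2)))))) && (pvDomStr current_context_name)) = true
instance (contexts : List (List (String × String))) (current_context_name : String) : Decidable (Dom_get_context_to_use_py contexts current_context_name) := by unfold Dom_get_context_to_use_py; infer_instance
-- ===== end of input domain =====

-- B replaces A's fused loop-with-accumulator by two independent searches (first 'toolforge', else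
-- last current-context match found as the first hit of a reversed scan): simpler decomposition, same cost.
-- Where Python A raises (KeyError on a missing key it reaches, or BadConfig when nothing matches),
-- both ports return "" at the corresponding point; those inputs are excluded by Pre_.

-- ===== PORT A =====
-- dict lookup d[k] (first match in the association list) = PySem.Dict.get? on the wrapped list
def ctxGet (c : List (String × String)) (k : String) : Option String :=
  PySem.Dict.get? ⟨c⟩ k

-- literal transliteration of A's loop; the accumulator `acc` is `current_context`
def getContextToUseLoop (current_context_name : String) : List (List (String × String)) → Option (List (String × String)) → String
  | [], acc =>
      match acc with
      | none => ""   -- A raises BadConfig here (outside Pre_)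
      | some c => (ctxGet c "context").getD ""
  | c :: rest, acc =>
      if ctxGet c "name" = some "toolforge" then
        (ctxGet c "context").getD ""
      else if ctxGet c "name" = some current_context_name then
        getContextToUseLoop current_context_name rest (some c)
      else
        getContextToUseLoop current_context_name rest acc

def get_context_to_use_py (contexts : List (List (String × String))) (current_context_name : String) : String :=
  getContextToUseLoop current_context_name contexts none

-- ===== PORT B =====
-- next((c for c in contexts if c["name"] == "toolforge"), None) → List.find?;
-- the reversed(contexts) loop returning at the first match → List.find? on the reversed list
def get_context_to_use_py_alt (contexts : List (List (String × String))) (current_context_name : String) : String :=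
  match contexts.find? (fun c => ctxGet c "name" == some "toolforge") with
  | some c => (ctxGet c "context").getD ""
  | none =>
      match contexts.reverse.find? (fun c => ctxGet c "name" == some current_context_name) with
      | some c => (ctxGet c "context").getD ""
      | none => ""   -- B raises BadConfig here (outside Pre_)

-- ===== PRECONDITION & SPEC =====
-- Pre_ excludes exactly the inputs on which Python A raises: a context reached by the scan whose
-- "name" key is missing (KeyError), a selected context without a "context" key (KeyError), and
-- the no-match case (BadConfig). It excludes no input on which A returns.
def preGetContextToUse (contexts : List (List (String × String))) (current_context_name : String) : Bool :=
  match contexts.find? (fun c => (ctxGet c "name").isNone || ctxGet c "name" == some "toolforge") with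
  | some c => ctxGet c "name" == some "toolforge" && (ctxGet c "context").isSome
  | none =>
      match (contexts.filter (fun c => ctxGet c "name" == some current_context_name)).getLast? with
      | some c => (ctxGet c "context").isSome
      | none => false

def Pre_get_context_to_use_py (contexts : List (List (String × String))) (current_context_name : String) : Prop :=
  preGetContextToUse contexts current_context_name = true
instance (contexts : List (List (String × String))) (current_context_name : String) : Decidable (Pre_get_context_to_use_py contexts current_context_name) := by unfold Pre_get_context_to_use_py; infer_instance

def pvWitness_get_context_to_use_py : (List (List (String × String))) × String :=
  ([[("name", "minikube"), ("context", "mini")], [("name", "prod"), ("context", "p1")]], "prod")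

def Spec_get_context_to_use_py (contexts : List (List (String × String))) (current_context_name : String) (out : String) : Prop := out = get_context_to_use_py_alt contexts current_context_name
instance (contexts : List (List (String × String))) (current_context_name : String) (out : String) : Decidable (Spec_get_context_to_use_py contexts current_context_name out) := by unfold Spec_get_context_to_use_py; infer_instance

-- ===== CLAIM (what is proved, stated in full; the proofs are below) =====
def Claim_equal_get_context_to_use_py : Prop := ∀ (contexts : List (List (String × String))) (current_context_name : String), Dom_get_context_to_use_py contexts current_context_name → Pre_get_context_to_use_py contexts current_context_name → Spec_get_context_to_use_py contexts current_context_name (get_context_to_use_py contexts current_context_name)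

-- ===== LEMMAS AND PROOFS =====

-- A's loop equals B's two-search shape, for every accumulator (the last in-list current match
-- overrides the accumulator; the accumulator is used only when the whole list has no match).
theorem getContextToUseLoop_eq (cur : String) (l : List (List (String × String))) :
    ∀ acc, getContextToUseLoop cur l acc =
      match l.find? (fun c => ctxGet c "name" == some "toolforge") with
      | some c => (ctxGet c "context").getD ""
      | none =>
          match l.reverse.find? (fun c => ctxGet c "name" == some cur) with
          | some c => (ctxGet c "context").getD ""
          | none =>
              match acc with
              | none => ""
              | some c => (ctxGet c "context").getD "" := by
  induction l with
  | nil => intro acc; rfl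
  | cons c rest ih =>
      intro acc
      by_cases htool : ctxGet c "name" = some "toolforge"
      · simp [getContextToUseLoop, htool, List.find?]
      · by_cases hcur : ctxGet c "name" = some cur
        · have hne' : cur ≠ "toolforge" := fun h => htool (by rw [h] at hcur; exact hcur)
          have hne : (cur == "toolforge") = false := beq_eq_false_iff_ne.mpr hne'
          simp only [getContextToUseLoop, hcur, if_true, ih (some c),
            List.find?, List.reverse_cons, List.find?_append]
          cases rest.find? (fun d => ctxGet d "name" == some "toolforge") <;>
            cases rest.reverse.find? (fun d => ctxGet d "name" == some cur) <;>
              simp [hne, hne']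
        · simp only [getContextToUseLoop, htool, hcur, if_false, ih acc,
            List.find?, List.reverse_cons, List.find?_append]
          simp only [beq_eq_false_iff_ne.mpr htool, beq_eq_false_iff_ne.mpr hcur]
          cases rest.find? (fun d => ctxGet d "name" == some "toolforge") <;>
            cases rest.reverse.find? (fun d => ctxGet d "name" == some cur) <;> simp

-- ===== VERDICT (by name: the statement is the Claim_ definition above) =====
theorem get_context_to_use_py_spec : Claim_equal_get_context_to_use_py := by
  intro contexts cur _ _
  unfold Spec_get_context_to_use_py get_context_to_use_py get_context_to_use_py_alt
  rw [getContextToUseLoop_eq]
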